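-- pv_equiv track=rewrite | github.com/dakota-rennels/Python-Notebooks | General Python Scripts/username_changes.py | possibleChanges
-- ===== SOURCE A (Python) =====
-- def possibleChanges(usernames):
--     results =[]
--
--     for username in usernames:
--         small_char = username[-1]
--         answer = "NO"
--
--         for i in range(len(username) - 2, -1, -1):
--             if username[i] > small_char:
--                 answer = "YES"
--                 break
--             small_char = min(small_char, username[i]
--             )
--         results.append(answer)
--
--     return results
-- ===== SOURCE B (Python) =====
-- def possibleChanges(usernames):
--     return ["NO" if sorted(u) == list(u) else "YES" for u in usernames]
-- ===== Notes on version B (the rewrite author's own statement) =====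
-- stated objective: simpler
-- what changed: Replaces the right-to-left suffix-minimum scan with a direct sortedness test: a username admits a change (YES) iff its characters are not already in non-decreasing order, i.e. sorted(u) != list(u).
-- crash fix: On lists containing the empty string A raises IndexError (username[-1]); B returns 'NO' for the empty string. — e.g. on possibleChanges([""]): A raises, B returns ["NO"]
import Mathlib
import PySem

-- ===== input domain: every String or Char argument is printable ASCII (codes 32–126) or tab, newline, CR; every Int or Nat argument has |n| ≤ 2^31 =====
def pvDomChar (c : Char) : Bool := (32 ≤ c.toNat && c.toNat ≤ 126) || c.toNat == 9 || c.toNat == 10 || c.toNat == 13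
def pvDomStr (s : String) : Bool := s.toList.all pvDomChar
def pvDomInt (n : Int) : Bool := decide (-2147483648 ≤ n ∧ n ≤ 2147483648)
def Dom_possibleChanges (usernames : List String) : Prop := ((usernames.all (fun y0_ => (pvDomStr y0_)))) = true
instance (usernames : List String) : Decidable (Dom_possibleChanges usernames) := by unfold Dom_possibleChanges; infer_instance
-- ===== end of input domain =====

-- B replaces A's right-to-left suffix-minimum scan by a direct sortedness test (sorted(u) == list(u)) — simpler; A raises on the empty string, excluded by Pre_.


-- ===== PORT A =====
-- inner loop: for i in range(len(username)-2, -1, -1): …  (state: small_char; break = early return "YES")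
def pvALoop (u : List Char) : List Int → Char → String
  | [], _ => "NO"
  | i :: rest, small =>
    match PySem.List.pyGet? u i with
    | none => "NO"   -- unreachable: every index produced by the range is valid
    | some c => if c > small then "YES" else pvALoop u rest (min small c)

-- per-username body; pyGet? u (-1) = none is Python's IndexError (excluded by Pre_)
def pvACheck (u : List Char) : String :=
  match PySem.List.pyGet? u (-1) with
  | none => "NO"   -- Python raises IndexError here; Pre_ excludes empty usernames
  | some last => pvALoop u (PySem.List.pyRange ((u.length : Int) - 2) (-1) (-1)) last

def possibleChanges (usernames : List String) : List String :=
  usernames.foldl (fun results u => results ++ [pvACheck u.toList]) []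

-- ===== PORT B =====
def possibleChanges_alt (usernames : List String) : List String :=
  usernames.map (fun u =>
    if PySem.List.sorted u.toList id false = u.toList then "NO" else "YES")

-- ===== PRECONDITION & SPEC =====
-- Pre_ excludes lists containing the empty string, on which A raises IndexError at username[-1].
def Pre_possibleChanges (usernames : List String) : Prop := "" ∉ usernames
instance (usernames : List String) : Decidable (Pre_possibleChanges usernames) := by unfold Pre_possibleChanges; infer_instance
def pvWitness_possibleChanges : List String := ["ba", "ab", "a"]

-- On lists containing the empty string A raises IndexError (username[-1]); B returns "NO" for the empty string.
def Raises_possibleChanges (usernames : List String) : Prop := "" ∈ usernames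
instance (usernames : List String) : Decidable (Raises_possibleChanges usernames) := by unfold Raises_possibleChanges; infer_instance
def pvRaiseWitness_possibleChanges : List String := [""]
def pvRaiseWitnessOut_possibleChanges : List String := ["NO"]

def Spec_possibleChanges (usernames : List String) (out : List String) : Prop := out = possibleChanges_alt usernames
instance (usernames : List String) (out : List String) : Decidable (Spec_possibleChanges usernames out) := by unfold Spec_possibleChanges; infer_instance

-- ===== CLAIM (what is proved, stated in full; the proofs are below) =====
def Claim_equal_possibleChanges : Prop := ∀ (usernames : List String), Dom_possibleChanges usernames → Pre_possibleChanges usernames → Spec_possibleChanges usernames (possibleChanges usernames)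
def Claim_raises_possibleChanges : Prop := (∀ (usernames : List String), Dom_possibleChanges usernames → Raises_possibleChanges usernames → ¬ Pre_possibleChanges usernames) ∧ (Dom_possibleChanges (pvRaiseWitness_possibleChanges) ∧ Raises_possibleChanges (pvRaiseWitness_possibleChanges) ∧ possibleChanges_alt (pvRaiseWitness_possibleChanges) = pvRaiseWitnessOut_possibleChanges)

-- ===== LEMMAS AND PROOFS =====

-- invariant of A's inner loop: having scanned indices k-1 … 0 with current suffix minimum m,
-- the answer is NO iff the first k characters are sorted and all of them are ≤ m
theorem pvALoop_char (u : List Char) : ∀ (k : Nat) (m : Char), k ≤ u.length →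
    pvALoop u (PySem.List.pyRange ((k : Int) - 1) (-1) (-1)) m =
      if (u.take k).Pairwise (· ≤ ·) ∧ ∀ c ∈ u.take k, c ≤ m then "NO" else "YES" := by
  intro k
  induction k with
  | zero =>
    intro m _
    rw [PySem.List.pyRange_neg_one_eq_nil (by omega)]
    simp [pvALoop]
  | succ k ih =>
    intro m hk
    have hklt : k < u.length := by omega
    have htake : u.take (k+1) = u.take k ++ [u[k]] := by
      rw [List.take_add_one, List.getElem?_eq_getElem hklt]; rfl
    rw [show ((k + 1 : Nat) : Int) - 1 = (k : Int) by push_cast; ring,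
        PySem.List.pyRange_neg_one_cons (by omega)]
    simp only [pvALoop, PySem.List.pyGet?_natCast, List.getElem?_eq_getElem hklt]
    rw [htake]
    by_cases hgt : u[k] > m
    · rw [if_pos hgt, if_neg]
      rintro ⟨_, hall⟩
      exact absurd (hall u[k] (List.mem_append_right _ (List.mem_singleton.mpr rfl))) (not_le_of_gt hgt)
    · rw [if_neg hgt, ih (min m u[k]) (by omega)]
      have hle : u[k] ≤ m := le_of_not_gt hgt
      congr 1
      simp only [List.pairwise_append, List.mem_append, List.mem_singleton,
        List.pairwise_singleton, eq_iff_iff, true_and]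
      constructor
      · rintro ⟨hp, hall⟩
        refine ⟨⟨hp, ?_⟩, ?_⟩
        · intro a ha b hb; rw [hb]; exact le_trans (hall a ha) (min_le_right _ _)
        · rintro c (hc | hc)
          · exact le_trans (hall c hc) (min_le_left _ _)
          · rw [hc]; exact hle
      · rintro ⟨⟨hp, hmax⟩, hall⟩
        exact ⟨hp, fun c hc => le_min (hall c (Or.inl hc)) (hmax c hc u[k] rfl)⟩

-- sorted u = u iff u is already non-decreasing
theorem sorted_eq_iff_pairwise (u : List Char) :
    PySem.List.sorted u id false = u ↔ u.Pairwise (· ≤ ·) := by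
  constructor
  · intro h
    have := PySem.List.sorted_pairwise (xs := u) (key := id)
    rw [h] at this
    simpa using this
  · intro h
    exact PySem.List.sorted_eq_self_of_pairwise (xs := u) (key := id) (by simpa using h)

-- per-username equality, for a nonempty username written as p ++ [a]
theorem pvACheck_eq (p : List Char) (a : Char) :
    pvACheck (p ++ [a]) = if PySem.List.sorted (p ++ [a]) id false = p ++ [a] then "NO" else "YES" := by
  unfold pvACheck
  rw [PySem.List.pyGet?_neg_one_append_singleton]
  have hlen : ((p ++ [a]).length : Int) - 2 = ((p.length : Nat) : Int) - 1 := by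
    simp; ring
  rw [hlen]
  show pvALoop (p ++ [a]) (PySem.List.pyRange ((p.length : Int) - 1) (-1) (-1)) a =
    if PySem.List.sorted (p ++ [a]) id false = p ++ [a] then "NO" else "YES"
  rw [pvALoop_char (p ++ [a]) p.length a (by simp)]
  have htake : (p ++ [a]).take p.length = p := by simp
  rw [htake]
  have hiff : (PySem.List.sorted (p ++ [a]) id false = p ++ [a]) ↔
      (p.Pairwise (· ≤ ·) ∧ ∀ c ∈ p, c ≤ a) := by
    rw [sorted_eq_iff_pairwise]
    simp only [List.pairwise_append, List.pairwise_singleton, true_and]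
    constructor
    · rintro ⟨hp, hmax⟩
      exact ⟨hp, fun c hc => hmax c hc a (List.mem_singleton.mpr rfl)⟩
    · rintro ⟨hp, hall⟩
      exact ⟨hp, fun x hx b hb => by rw [List.mem_singleton] at hb; rw [hb]; exact hall x hx⟩
  simp only [hiff]

theorem possibleChanges_eq_map (usernames : List String) :
    possibleChanges usernames = usernames.map (fun u => pvACheck u.toList) := by
  unfold possibleChanges
  rw [PySem.List.foldl_append_singleton_eq_map]
  simp

theorem possibleChanges_spec : Claim_equal_possibleChanges := by
  intro usernames _ hpre
  unfold Spec_possibleChanges possibleChanges_alt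
  rw [possibleChanges_eq_map]
  apply List.map_congr_left
  intro u hu
  rcases List.eq_nil_or_concat u.toList with h | ⟨p, a, h⟩
  · exact absurd (by rwa [String.toList_eq_nil_iff.mp h] at hu) hpre
  · rw [List.concat_eq_append] at h
    rw [h, pvACheck_eq p a]

@[simp]
theorem possibleChanges_raises : Claim_raises_possibleChanges := by
  unfold Claim_raises_possibleChanges
  exact ⟨fun us _ h hpre => hpre h, by decide⟩
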